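-- pv_equiv track=rewrite | github.com/wwang2/circle-packing | orbits/handelman-lp-001/poly.py | mono_mul
-- ===== SOURCE A (Python) =====
-- from typing import Dict, Tuple
--
-- Monomial = Tuple[Tuple[int, int], ...]
--
-- def mono_mul(a: Monomial, b: Monomial) -> Monomial:
--     """Multiply two monomials represented as sorted ((var, exp), ...) tuples."""
--     if not a:
--         return b
--     if not b:
--         return a
--     # Merge two sorted lists
--     out = []
--     i = j = 0
--     la, lb = len(a), len(b)
--     while i < la and j < lb:
--         va, ea = a[i]
--         vb, eb = b[j]
--         if va == vb:
--             out.append((va, ea + eb))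
--             i += 1
--             j += 1
--         elif va < vb:
--             out.append((va, ea))
--             i += 1
--         else:
--             out.append((vb, eb))
--             j += 1
--     if i < la:
--         out.extend(a[i:])
--     if j < lb:
--         out.extend(b[j:])
--     return tuple(out)
-- ===== SOURCE B (Python) =====
-- def mono_mul(a, b):
--     """Multiply two monomials represented as sorted ((var, exp), ...) tuples."""
--     if not a:
--         return b
--     if not b:
--         return a
--     return tuple(_merge(list(a), list(b)))
--
-- def _merge(xs, ys):
--     if not xs:
--         return ys
--     if not ys:
--         return xs
--     (va, ea), (vb, eb) = xs[0], ys[0]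
--     if va == vb:
--         return [(va, ea + eb)] + _merge(xs[1:], ys[1:])
--     if va < vb:
--         return [(va, ea)] + _merge(xs[1:], ys)
--     return [(vb, eb)] + _merge(xs, ys[1:])
-- ===== Notes on version B (the rewrite author's own statement) =====
-- stated objective: alternative
-- what changed: Replaces the index-based two-pointer while loop with an append-accumulator and tail slices by a structural recursion on the two lists that builds the result front-to-back by cons, with no indices or accumulator.
import Mathlib
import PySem

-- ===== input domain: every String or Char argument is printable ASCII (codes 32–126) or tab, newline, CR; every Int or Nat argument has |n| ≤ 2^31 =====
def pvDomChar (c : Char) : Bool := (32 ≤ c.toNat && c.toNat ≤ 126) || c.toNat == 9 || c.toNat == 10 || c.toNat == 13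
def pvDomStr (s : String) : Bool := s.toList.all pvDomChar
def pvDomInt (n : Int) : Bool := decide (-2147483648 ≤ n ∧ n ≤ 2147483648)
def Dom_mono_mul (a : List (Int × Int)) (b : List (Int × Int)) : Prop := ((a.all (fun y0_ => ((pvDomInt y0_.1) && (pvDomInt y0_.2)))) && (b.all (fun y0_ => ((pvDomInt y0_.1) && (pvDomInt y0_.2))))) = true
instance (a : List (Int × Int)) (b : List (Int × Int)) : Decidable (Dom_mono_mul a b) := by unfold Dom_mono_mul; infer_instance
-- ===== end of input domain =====

-- B replaces A's index-based two-pointer loop by a structural recursion on the two lists; alternative decomposition, same cost.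


-- ===== PORT A =====
-- the while loop of A: indices i, j, accumulator out (appended at the back), then the two
-- extend slices; fuel (= la + lb at the call site) only makes the recursion structural and is
-- never exhausted while the loop condition holds
def monoMulLoop (a b : List (Int × Int)) : Nat → Nat → Nat → List (Int × Int) → List (Int × Int)
  | 0, i, j, out =>
      (out ++ (if i < a.length then a.drop i else []))
        ++ (if j < b.length then b.drop j else [])
  | fuel+1, i, j, out =>
      if h : i < a.length ∧ j < b.length then
        let p := a[i]
        let q := b[j]
        if p.1 == q.1 then monoMulLoop a b fuel (i+1) (j+1) (out ++ [(p.1, p.2 + q.2)])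
        else if p.1 < q.1 then monoMulLoop a b fuel (i+1) j (out ++ [(p.1, p.2)])
        else monoMulLoop a b fuel i (j+1) (out ++ [(q.1, q.2)])
      else
        (out ++ (if i < a.length then a.drop i else []))
          ++ (if j < b.length then b.drop j else [])

def mono_mul (a : List (Int × Int)) (b : List (Int × Int)) : List (Int × Int) :=
  if a = [] then b
  else if b = [] then a
  else monoMulLoop a b (a.length + b.length) 0 0 []

-- ===== PORT B =====
-- B's _merge: structural recursion on both lists, result built by cons
def mergeAlt : List (Int × Int) → List (Int × Int) → List (Int × Int)
  | [], ys => ys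
  | xs, [] => xs
  | (va, ea) :: xs, (vb, eb) :: ys =>
    if va == vb then (va, ea + eb) :: mergeAlt xs ys
    else if va < vb then (va, ea) :: mergeAlt xs ((vb, eb) :: ys)
    else (vb, eb) :: mergeAlt ((va, ea) :: xs) ys

def mono_mul_alt (a : List (Int × Int)) (b : List (Int × Int)) : List (Int × Int) :=
  if a = [] then b
  else if b = [] then a
  else mergeAlt a b

-- ===== PRECONDITION & SPEC =====
def Spec_mono_mul (a : List (Int × Int)) (b : List (Int × Int)) (out : List (Int × Int)) : Prop := out = mono_mul_alt a b
instance (a : List (Int × Int)) (b : List (Int × Int)) (out : List (Int × Int)) : Decidable (Spec_mono_mul a b out) := by unfold Spec_mono_mul; infer_instance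

-- ===== CLAIM (what is proved, stated in full; the proofs are below) =====
def Claim_equal_mono_mul : Prop := ∀ (a : List (Int × Int)) (b : List (Int × Int)), Dom_mono_mul a b → Spec_mono_mul a b (mono_mul a b)

-- ===== LEMMAS AND PROOFS =====

lemma mergeAlt_nil_right (xs : List (Int × Int)) : mergeAlt xs [] = xs := by
  cases xs with
  | nil => simp [mergeAlt]
  | cons x xs => simp [mergeAlt]

lemma monoMulLoop_eq_mergeAlt (a b : List (Int × Int)) :
    ∀ (fuel i j : Nat) (out : List (Int × Int)),
      (a.length - i) + (b.length - j) ≤ fuel →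
      monoMulLoop a b fuel i j out = out ++ mergeAlt (a.drop i) (b.drop j) := by
  intro fuel
  induction fuel with
  | zero =>
    intro i j out hle
    have hi : a.length ≤ i := by omega
    have hj : b.length ≤ j := by omega
    simp [monoMulLoop, List.drop_eq_nil_of_le hi, List.drop_eq_nil_of_le hj,
      Nat.not_lt.mpr hi, Nat.not_lt.mpr hj, mergeAlt]
  | succ fuel ih =>
    intro i j out hle
    rw [monoMulLoop]
    split
    case isTrue h =>
      have ha : a.drop i = a[i] :: a.drop (i+1) := (List.getElem_cons_drop h.1).symm
      have hb : b.drop j = b[j] :: b.drop (j+1) := (List.getElem_cons_drop h.2).symm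
      rw [ha, hb, show a[i] = (a[i].1, a[i].2) from rfl, show b[j] = (b[j].1, b[j].2) from rfl,
          mergeAlt]
      by_cases heq : (a[i].1 == b[j].1) = true
      · simp only [heq, if_pos]
        rw [ih (i+1) (j+1) _ (by omega)]
        simp [List.append_assoc]
      · by_cases hlt : a[i].1 < b[j].1
        · simp only [heq, hlt, if_neg, if_pos, Bool.false_eq_true, not_false_iff]
          rw [ih (i+1) j _ (by omega), hb]
          simp [List.append_assoc]
        · simp only [heq, hlt, if_neg, Bool.false_eq_true, not_false_iff]
          rw [ih i (j+1) _ (by omega), ha]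
          simp [List.append_assoc]
    case isFalse h =>
      rcases Nat.lt_or_ge i a.length with hi | hi
      · have hj : b.length ≤ j := by
          rcases Nat.lt_or_ge j b.length with hj | hj
          · exact absurd ⟨hi, hj⟩ h
          · exact hj
        simp [List.drop_eq_nil_of_le hj, mergeAlt_nil_right, hi, Nat.not_lt.mpr hj]
      · simp [List.drop_eq_nil_of_le hi, mergeAlt, Nat.not_lt.mpr hi]

-- ===== VERDICT (by name: the statement is the Claim_ definition above) =====
theorem mono_mul_spec : Claim_equal_mono_mul := by
  intro a b _
  unfold Spec_mono_mul mono_mul mono_mul_alt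
  split_ifs with h1 h2
  · rfl
  · rfl
  · simpa using monoMulLoop_eq_mergeAlt a b (a.length + b.length) 0 0 [] (by omega)
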